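-- pv_equiv track=rewrite | github.com/cliarie/grind25 | nes.py | fit_text_on_board
-- ===== SOURCE A (Python) =====
-- def fit_text_on_board(text, board_size=26):
--     board = [["" for _ in range(board_size)] for _ in range(board_size)]
--     row, col = 0, 0
--
--     for char in text:
--         if row >= board_size:
--             break
--         board[row][col] = char
--         col += 1
--         if col >= board_size:
--             col = 0
--             row += 1
--
--     return board
-- ===== SOURCE B (Python) =====
-- def fit_text_on_board(text, board_size=26):
--     chars = list(text[:board_size * board_size])
--     board = []
--     for r in range(board_size):
--         row = chars[r * board_size:(r + 1) * board_size]
--         row += [""] * (board_size - len(row))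
--         board.append(row)
--     return board
-- ===== Notes on version B (the rewrite author's own statement) =====
-- stated objective: simpler
-- what changed: Replaces the flat character loop with row/col counters, in-range check and manual wrap-around by pre-truncating the text to board_size^2 characters and building the board row by row from slices padded with empty strings; no mutable counters or cell assignments remain.
import Mathlib
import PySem

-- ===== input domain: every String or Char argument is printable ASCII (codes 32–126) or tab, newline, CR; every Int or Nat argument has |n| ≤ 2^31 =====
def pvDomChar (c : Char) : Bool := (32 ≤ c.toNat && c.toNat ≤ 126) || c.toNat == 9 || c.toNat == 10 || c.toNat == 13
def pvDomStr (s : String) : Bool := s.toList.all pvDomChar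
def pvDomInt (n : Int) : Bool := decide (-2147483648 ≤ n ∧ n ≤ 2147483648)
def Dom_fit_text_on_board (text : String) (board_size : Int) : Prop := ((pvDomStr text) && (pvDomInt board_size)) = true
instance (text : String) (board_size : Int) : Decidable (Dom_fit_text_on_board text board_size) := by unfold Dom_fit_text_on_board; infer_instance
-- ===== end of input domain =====

-- B replaces A's flat character loop with row/col counters and wrap-around by truncating the
-- text to board_size^2 characters and building each row from a padded slice (objective: simpler).


-- ===== PORT A =====
-- the 'for char in text' loop; row/col are always in range when a write happens, so
-- List.set is exact for Python's board[row][col] = char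
def pvLoopA (bs : Int) : List Char → List (List String) → Nat → Nat → List (List String)
  | [], board, _, _ => board
  | ch :: cs, board, row, col =>
    if (row : Int) ≥ bs then board
    else
      let board' := board.set row ((board.getD row []).set col (String.ofList [ch]))
      if ((col : Int) + 1) ≥ bs then pvLoopA bs cs board' (row + 1) 0
      else pvLoopA bs cs board' row (col + 1)

def fit_text_on_board (text : String) (board_size : Int) : List (List String) :=
  let board := (PySem.List.pyRange 0 board_size 1).map
    (fun _ => (PySem.List.pyRange 0 board_size 1).map (fun _ => ""))
  pvLoopA board_size text.toList board 0 0

-- ===== PORT B =====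
def fit_text_on_board_alt (text : String) (board_size : Int) : List (List String) :=
  let chars : List String :=
    (PySem.List.slice text.toList none (some (board_size * board_size))).map
      (fun c => String.ofList [c])
  (PySem.List.pyRange 0 board_size 1).foldl
    (fun board r =>
      let row := PySem.List.slice chars (some (r * board_size)) (some ((r + 1) * board_size))
      board ++ [row ++ PySem.List.pyRepeat [""] (board_size - (row.length : Int))])
    []

-- ===== PRECONDITION & SPEC =====
def Spec_fit_text_on_board (text : String) (board_size : Int) (out : List (List String)) : Prop := out = fit_text_on_board_alt text board_size
instance (text : String) (board_size : Int) (out : List (List String)) : Decidable (Spec_fit_text_on_board text board_size out) := by unfold Spec_fit_text_on_board; infer_instance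

-- ===== CLAIM (what is proved, stated in full; the proofs are below) =====
def Claim_equal_fit_text_on_board : Prop := ∀ (text : String) (board_size : Int), Dom_fit_text_on_board text board_size → Spec_fit_text_on_board text board_size (fit_text_on_board text board_size)

-- ===== LEMMAS AND PROOFS =====

-- the reference value: a B×B grid whose cell (r,c) holds m.getD (r*B+c) ""
def pvGrid (B : Nat) (m : List String) : List (List String) :=
  (List.range B).map (fun r => (List.range B).map (fun c => m.getD (r * B + c) ""))

theorem pvIdx_lt {B r c : Nat} (hr : r < B) (hc : c < B) : r * B + c < B * B := by
  calc r * B + c < r * B + B := by omega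
    _ = (r + 1) * B := by ring
    _ ≤ B * B := Nat.mul_le_mul_right B hr

theorem pvGrid_congr {B : Nat} {m m' : List String}
    (h : ∀ i, i < B * B → m.getD i "" = m'.getD i "") : pvGrid B m = pvGrid B m' := by
  unfold pvGrid
  refine List.map_congr_left (fun r hr => ?_)
  refine List.map_congr_left (fun c hc => ?_)
  exact h _ (pvIdx_lt (List.mem_range.mp hr) (List.mem_range.mp hc))

theorem pvGrid_append_of_le {B : Nat} {m : List String} (x : List String)
    (h : B * B ≤ m.length) : pvGrid B (m ++ x) = pvGrid B m := by
  refine pvGrid_congr (fun i hi => ?_)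
  simp [List.getD_eq_getElem?_getD, List.getElem?_append_left (by omega : i < m.length)]

theorem pvGrid_take {B : Nat} (m : List String) : pvGrid B (m.take (B * B)) = pvGrid B m := by
  refine pvGrid_congr (fun i hi => ?_)
  simp [List.getD_eq_getElem?_getD, hi]

theorem pvEnt_append {m : List String} (v : String) (k : Nat) :
    (m ++ [v]).getD k "" = if k = m.length then v else m.getD k "" := by
  by_cases hk : k = m.length
  · simp [hk, List.getD_eq_getElem?_getD]
  · rcases Nat.lt_or_ge k m.length with h | h
    · simp [hk, List.getD_eq_getElem?_getD, List.getElem?_append_left h]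
    · simp [hk, List.getD_eq_getElem?_getD,
        List.getElem?_eq_none_iff.mpr (show m.length ≤ k by omega),
        List.getElem?_eq_none_iff.mpr (show (m ++ [v]).length ≤ k by simp; omega)]

theorem pvGrid_row {B r : Nat} (m : List String) (h : r < (pvGrid B m).length) (_hr : r < B) :
    (pvGrid B m)[r]'h = (List.range B).map (fun c => m.getD (r * B + c) "") := by
  simp [pvGrid]

theorem pvGrid_set {B r c : Nat} {m : List String} (v : String)
    (hr : r < B) (hc : c < B) (hm : m.length = B * r + c) :
    (pvGrid B m).set r (((pvGrid B m).getD r []).set c v) = pvGrid B (m ++ [v]) := by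
  have hrow : (pvGrid B m).getD r [] = (List.range B).map (fun c => m.getD (r * B + c) "") := by
    simp [pvGrid, List.getD_eq_getElem?_getD, List.getElem?_map, List.getElem?_range hr]
  apply List.ext_getElem
  · simp [pvGrid]
  · intro i h1 h2
    have hiB : i < B := by simpa [pvGrid] using h2
    rw [List.getElem_set, pvGrid_row (m ++ [v]) h2 hiB]
    split_ifs with hir
    · subst hir
      rw [hrow]
      apply List.ext_getElem
      · simp
      · intro j h3 h4
        have hjB : j < B := by simpa using h4
        rw [List.getElem_set]
        simp only [List.getElem_map, List.getElem_range, pvEnt_append]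
        have hmul : r * B + j = m.length ↔ j = c := by
          rw [hm, Nat.mul_comm B r]; omega
        by_cases hjc : c = j
        · rw [if_pos hjc, if_pos (hmul.mpr hjc.symm)]
        · rw [if_neg hjc, if_neg (fun h => hjc (hmul.mp h).symm)]
    · have h2' : i < (pvGrid B m).length := by simpa [pvGrid] using hiB
      rw [pvGrid_row m h2' hiB]
      refine List.map_congr_left (fun j hj => ?_)
      have hjB : j < B := List.mem_range.mp hj
      have hne : i * B + j ≠ m.length := by
        rw [hm]
        intro hEq
        apply hir
        have h1 : i * B + j = r * B + c := by rw [hEq]; ring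
        rcases Nat.lt_trichotomy i r with h | h | h
        · nlinarith
        · omega
        · nlinarith
      rw [pvEnt_append, if_neg hne]

-- A's loop, started on the grid of an already-written prefix m at the matching (row, col),
-- fills in the remaining characters
theorem pvLoopA_grid {B : Nat} (hB : 0 < B) :
    ∀ (cs : List Char) (m : List String) (r c : Nat), c < B → m.length = B * r + c →
      pvLoopA (B : Int) cs (pvGrid B m) r c
        = pvGrid B (m ++ cs.map (fun ch => String.ofList [ch])) := by
  intro cs
  induction cs with
  | nil => intro m r c _ _; simp [pvLoopA]
  | cons ch cs ih =>
    intro m r c hc hm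
    simp only [pvLoopA]
    by_cases hr : (r : Int) ≥ (B : Int)
    · rw [if_pos hr]
      have hrB : B ≤ r := by exact_mod_cast hr
      exact (pvGrid_append_of_le _ (by rw [hm]; nlinarith)).symm
    · rw [if_neg hr]
      have hrB : r < B := by exact_mod_cast not_le.mp hr
      rw [pvGrid_set (String.ofList [ch]) hrB hc hm]
      by_cases hcol : ((c : Int) + 1) ≥ (B : Int)
      · rw [if_pos hcol]
        have hcB : c + 1 = B := by
          have : B ≤ c + 1 := by exact_mod_cast hcol
          omega
        rw [ih (m ++ [String.ofList [ch]]) (r + 1) 0 hB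
          (by simp [hm, Nat.mul_succ]; omega)]
        simp
      · rw [if_neg hcol]
        have hcB : c + 1 < B := by
          have : (c : Int) + 1 < B := not_le.mp hcol
          exact_mod_cast this
        rw [ih (m ++ [String.ofList [ch]]) r (c + 1) hcB (by simp [hm]; omega)]
        simp

-- A's freshly built empty board is the grid of the empty prefix
theorem pvInit_eq_grid (B : Nat) :
    (PySem.List.pyRange 0 (B : Int) 1).map
      (fun _ => (PySem.List.pyRange 0 (B : Int) 1).map (fun _ => ("" : String)))
      = pvGrid B [] := by
  simp [PySem.List.pyRange_one, pvGrid, List.getD, Function.comp_def, List.map_const']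

-- one row of B: the padded slice is row k of the grid
theorem pvRow_eq {B : Nat} (_hB : 0 < B) (chars : List String) (k : Nat) (hk : k < B) :
    PySem.List.slice chars (some ((k : Int) * B)) (some (((k : Int) + 1) * B))
      ++ PySem.List.pyRepeat [""]
          ((B : Int) - ((PySem.List.slice chars (some ((k : Int) * B)) (some (((k : Int) + 1) * B))).length : Int))
    = (List.range B).map (fun c => chars.getD (k * B + c) "") := by
  have hcast1 : ((k : Int) * B) = ((k * B : Nat) : Int) := by push_cast; ring
  have hcast2 : (((k : Int) + 1) * B) = (((k + 1) * B : Nat) : Int) := by push_cast; ring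
  rw [hcast1, hcast2, PySem.List.slice_natCast]
  have hsub : (k + 1) * B - k * B = B := by rw [Nat.succ_mul]; omega
  rw [hsub]
  set S := (chars.drop (k * B)).take B with hS
  have hSlen : S.length = min B (chars.length - k * B) := by simp [hS]
  have hSle : S.length ≤ B := by omega
  rw [PySem.List.pyRepeat_singleton]
  have hrep : (((B : Int)) - (S.length : Int)).toNat = B - S.length := by omega
  rw [hrep]
  apply List.ext_getElem
  · simp; omega
  · intro j h1 h2
    have hjB : j < B := by simpa using h2
    by_cases hj : j < S.length
    · rw [List.getElem_append_left hj]
      have : S[j] = chars[k * B + j]'(by omega) := by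
        simp [hS]
      rw [this]
      simp [List.getElem_map, List.getElem_range,
        List.getD_eq_getElem?_getD, List.getElem?_eq_getElem (by omega : k * B + j < chars.length)]
    · rw [List.getElem_append_right (by omega)]
      have hout : chars.length ≤ k * B + j := by omega
      simp [List.getElem_map, List.getElem_range, List.getD_eq_getElem?_getD,
        List.getElem?_eq_none_iff.mpr hout]

-- B equals the grid of the text's characters
theorem pvAlt_eq_grid (text : String) (B : Nat) (hB : 0 < B) :
    fit_text_on_board_alt text (B : Int)
      = pvGrid B (text.toList.map (fun c => String.ofList [c])) := by
  unfold fit_text_on_board_alt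
  rw [PySem.List.foldl_append_singleton_eq_map]
  have hsq : (B : Int) * (B : Int) = ((B * B : Nat) : Int) := by push_cast; ring
  rw [hsq, PySem.List.slice_to_natCast, List.map_take, PySem.List.pyRange_one]
  simp only [List.map_map, List.nil_append, sub_zero, Int.toNat_natCast, Function.comp_def,
    zero_add]
  rw [← pvGrid_take (B := B) (m := text.toList.map (fun c => String.ofList [c]))]
  unfold pvGrid
  refine List.map_congr_left (fun k hk => ?_)
  have hkB : k < B := List.mem_range.mp hk
  exact pvRow_eq hB ((text.toList.map (fun c => String.ofList [c])).take (B * B)) k hkB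

theorem pvLoopA_nil_board (bs : Int) (hbs : bs ≤ 0) (cs : List Char) :
    pvLoopA bs cs [] 0 0 = [] := by
  cases cs with
  | nil => simp [pvLoopA]
  | cons c cs => simp [pvLoopA]; omega

-- ===== VERDICT (by name: the statement is the Claim_ definition above) =====
theorem fit_text_on_board_spec : Claim_equal_fit_text_on_board := by
  intro text bs _
  unfold Spec_fit_text_on_board
  by_cases hbs : 0 < bs
  · obtain ⟨B, rfl⟩ : ∃ B : Nat, bs = (B : Int) :=
      ⟨bs.toNat, (Int.toNat_of_nonneg (by omega)).symm⟩
    have hB : 0 < B := by exact_mod_cast hbs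
    simp only [fit_text_on_board]
    rw [pvInit_eq_grid B,
      pvLoopA_grid hB text.toList [] 0 0 hB (by simp),
      pvAlt_eq_grid text B hB]
    simp
  · have h0 : bs ≤ 0 := by omega
    simp only [fit_text_on_board, fit_text_on_board_alt]
    rw [PySem.List.pyRange_one_eq_nil h0]
    simp [pvLoopA_nil_board bs h0]
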